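-- pv_equiv track=rewrite | github.com/HiveMinds/gitbrowserinteract | code/project1/src/helper.py | parse_creds
-- ===== SOURCE A (Python) =====
-- def parse_creds(lines):
--     """Gets the GitLab server credentials from the local credentials file.
--
--     :param lines:
--     """
--     username_identifier = "GITLAB_SERVER_ACCOUNT_GLOBAL="
--     pwd_identifier = "GITLAB_SERVER_PASSWORD_GLOBAL="  # nosec
--     username = None
--     pwd = None
--     for line in lines:
--         if line[: len(username_identifier)] == username_identifier:
--             username = line[len(username_identifier) :]
--         if line[: len(pwd_identifier)] == pwd_identifier:
--             pwd = line[len(pwd_identifier) :]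
--     if username is not None:
--         if pwd is not None:
--             return username, pwd
--         raise Exception("Did not get password.")
--     raise Exception("Did not get username.")
-- ===== SOURCE B (Python) =====
-- def parse_creds(lines):
--     """Gets the GitLab server credentials from the local credentials file.
--
--     :param lines:
--     """
--     def last_value(prefix):
--         for line in reversed(lines):
--             if line.startswith(prefix):
--                 return line[len(prefix):]
--         return None
--
--     username = last_value("GITLAB_SERVER_ACCOUNT_GLOBAL=")
--     pwd = last_value("GITLAB_SERVER_PASSWORD_GLOBAL=")
--     if username is not None:
--         if pwd is not None:
--             return username, pwd
--         raise Exception("Did not get password.")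
--     raise Exception("Did not get username.")
-- ===== Notes on version B (the rewrite author's own statement) =====
-- stated objective: idiomatic
-- what changed: Replaces the single forward fold carrying two Optional accumulators (last match wins by overwriting) by two reverse scans that each return the first (= last) matching line's suffix via startswith and exit early.
import Mathlib
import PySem

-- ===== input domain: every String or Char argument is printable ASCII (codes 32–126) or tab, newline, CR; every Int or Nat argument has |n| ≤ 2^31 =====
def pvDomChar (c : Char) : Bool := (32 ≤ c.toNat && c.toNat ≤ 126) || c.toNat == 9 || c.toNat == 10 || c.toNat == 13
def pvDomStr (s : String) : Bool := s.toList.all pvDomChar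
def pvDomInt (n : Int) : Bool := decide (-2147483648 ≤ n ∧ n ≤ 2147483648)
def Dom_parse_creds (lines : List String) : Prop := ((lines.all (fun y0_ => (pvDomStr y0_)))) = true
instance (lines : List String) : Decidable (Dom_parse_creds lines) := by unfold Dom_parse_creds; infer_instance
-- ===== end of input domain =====

-- B differs from A: two reverse scans with early exit replace A's single forward fold with two
-- Optional accumulators. Both Pythons raise when a credential is missing; Pre_ excludes that.

-- ===== PORT A =====
-- one iteration of A's for-loop body over the state (username, pwd)
def pvStepA (st : Option String × Option String) (line : String) : Option String × Option String :=
  let st1 :=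
    if PySem.Str.slice line none (some 29) = "GITLAB_SERVER_ACCOUNT_GLOBAL="
    then (some (PySem.Str.slice line (some 29) none), st.2) else st
  if PySem.Str.slice line none (some 30) = "GITLAB_SERVER_PASSWORD_GLOBAL="
  then (st1.1, some (PySem.Str.slice line (some 30) none)) else st1

def parse_creds (lines : List String) : String × String :=
  match lines.foldl pvStepA (none, none) with
  | (some u, some p) => (u, p)
  | (some _, none) => ("", "")  -- Python: raise Exception("Did not get password.")  (outside Pre_)
  | (none, _) => ("", "")       -- Python: raise Exception("Did not get username.")  (outside Pre_)

-- ===== PORT B =====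
-- B's last_value: first match in the reversed list (29 resp. 30 is len(prefix))
def pvLastValue (rev : List String) (pre : String) (n : Int) : Option String :=
  match rev with
  | [] => none
  | line :: rest =>
      if PySem.Str.startswith line pre
      then some (PySem.Str.slice line (some n) none)
      else pvLastValue rest pre n

def parse_creds_alt (lines : List String) : String × String :=
  let rev := lines.reverse
  match pvLastValue rev "GITLAB_SERVER_ACCOUNT_GLOBAL=" 29,
        pvLastValue rev "GITLAB_SERVER_PASSWORD_GLOBAL=" 30 with
  | some u, some p => (u, p)
  | some _, none => ("", "")  -- Python: raise Exception("Did not get password.")  (outside Pre_)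
  | none, _ => ("", "")       -- Python: raise Exception("Did not get username.")  (outside Pre_)

-- ===== PRECONDITION & SPEC =====
-- Pre_ excludes exactly the inputs on which A raises ("Did not get username." / "Did not get
-- password."): some line must carry each of the two identifiers.
def Pre_parse_creds (lines : List String) : Prop :=
  (lines.any (fun l => PySem.Str.startswith l "GITLAB_SERVER_ACCOUNT_GLOBAL=")) = true ∧
  (lines.any (fun l => PySem.Str.startswith l "GITLAB_SERVER_PASSWORD_GLOBAL=")) = true
instance (lines : List String) : Decidable (Pre_parse_creds lines) := by
  unfold Pre_parse_creds; infer_instance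

def pvWitness_parse_creds : List String :=
  ["GITLAB_SERVER_ACCOUNT_GLOBAL=user", "GITLAB_SERVER_PASSWORD_GLOBAL=pw"]

def Spec_parse_creds (lines : List String) (out : String × String) : Prop := out = parse_creds_alt lines
instance (lines : List String) (out : String × String) : Decidable (Spec_parse_creds lines out) := by unfold Spec_parse_creds; infer_instance

-- ===== CLAIM (what is proved, stated in full; the proofs are below) =====
def Claim_equal_parse_creds : Prop := ∀ (lines : List String), Dom_parse_creds lines → Pre_parse_creds lines → Spec_parse_creds lines (parse_creds lines)

-- ===== LEMMAS AND PROOFS =====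

-- A's slice-prefix comparison is exactly startswith (n = the key's length)
theorem pvSliceEqIff (line k : String) (n : Int) (hn : 0 ≤ n) (h : k.toList.length = n.toNat) :
    (PySem.Str.slice line none (some n) = k) ↔ PySem.Str.startswith line k = true := by
  rw [← String.toList_inj, PySem.Str.toList_slice, PySem.Chars.slice_eq_listSlice,
      PySem.List.slice_to _ hn, PySem.Str.startswith_eq, PySem.Chars.startswith_iff,
      List.prefix_iff_eq_take, h]
  exact eq_comm

theorem pvLastValue_append (xs ys : List String) (pre : String) (n : Int) :
    pvLastValue (xs ++ ys) pre n = (pvLastValue xs pre n).or (pvLastValue ys pre n) := by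
  induction xs with
  | nil => simp [pvLastValue]
  | cons x xs ih =>
      simp only [List.cons_append, pvLastValue]
      split <;> simp [ih]

-- loop invariant: A's fold from any state equals B's reverse search, falling back to the state
theorem pvLoopEq (lines : List String) (u p : Option String) :
    lines.foldl pvStepA (u, p) =
      ((pvLastValue lines.reverse "GITLAB_SERVER_ACCOUNT_GLOBAL=" 29).or u,
       (pvLastValue lines.reverse "GITLAB_SERVER_PASSWORD_GLOBAL=" 30).or p) := by
  induction lines generalizing u p with
  | nil => simp [pvLastValue]
  | cons line rest ih =>
      have hu : (pvStepA (u, p) line).1 =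
          (if PySem.Str.startswith line "GITLAB_SERVER_ACCOUNT_GLOBAL=" then
            some (PySem.Str.slice line (some 29) none) else none).or u := by
        simp only [pvStepA,
          pvSliceEqIff line "GITLAB_SERVER_ACCOUNT_GLOBAL=" 29 (by norm_num) (by decide),
          pvSliceEqIff line "GITLAB_SERVER_PASSWORD_GLOBAL=" 30 (by norm_num) (by decide)]
        by_cases h1 : PySem.Str.startswith line "GITLAB_SERVER_ACCOUNT_GLOBAL=" = true <;>
          by_cases h2 : PySem.Str.startswith line "GITLAB_SERVER_PASSWORD_GLOBAL=" = true <;>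
          simp_all
      have hp : (pvStepA (u, p) line).2 =
          (if PySem.Str.startswith line "GITLAB_SERVER_PASSWORD_GLOBAL=" then
            some (PySem.Str.slice line (some 30) none) else none).or p := by
        simp only [pvStepA,
          pvSliceEqIff line "GITLAB_SERVER_ACCOUNT_GLOBAL=" 29 (by norm_num) (by decide),
          pvSliceEqIff line "GITLAB_SERVER_PASSWORD_GLOBAL=" 30 (by norm_num) (by decide)]
        by_cases h1 : PySem.Str.startswith line "GITLAB_SERVER_ACCOUNT_GLOBAL=" = true <;>
          by_cases h2 : PySem.Str.startswith line "GITLAB_SERVER_PASSWORD_GLOBAL=" = true <;>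
          simp_all
      calc (line :: rest).foldl pvStepA (u, p)
          = rest.foldl pvStepA ((pvStepA (u, p) line).1, (pvStepA (u, p) line).2) := by
            simp [List.foldl_cons]
        _ = _ := by
            rw [ih, hu, hp, List.reverse_cons, pvLastValue_append, pvLastValue_append]
            simp [pvLastValue, Option.or_assoc]
            constructor <;> rfl

-- ===== VERDICT (by name: the statement is the Claim_ definition above) =====
theorem parse_creds_spec : Claim_equal_parse_creds := by
  intro lines _ _
  unfold Spec_parse_creds parse_creds parse_creds_alt
  rw [pvLoopEq]
  simp only [Option.or_none]
  rcases pvLastValue lines.reverse "GITLAB_SERVER_ACCOUNT_GLOBAL=" 29 with _ | u <;>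
    rcases pvLastValue lines.reverse "GITLAB_SERVER_PASSWORD_GLOBAL=" 30 with _ | p <;> rfl
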